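-- pv_equiv track=rewrite | github.com/anthonytk31415/leetcode | python-fundamentals/trees/isEvenOddTree.py | even_cond
-- ===== SOURCE A (Python) =====
-- def even_cond(arr):
--     if not arr:
--         return True
--     prev = arr[0]
--     if prev % 2 != 1:
--         return False
--     for i in range(1, len(arr)):
--         if arr[i] % 2 !=1:
--             return False
--         if arr[i] <= prev:
--             return False
--         prev = arr[i]
--     return True
-- ===== SOURCE B (Python) =====
-- def even_cond(arr):
--     return arr == sorted(set(arr)) and set(x % 2 for x in arr) <= {1}
-- ===== Notes on version B (the rewrite author's own statement) =====
-- stated objective: alternative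
-- what changed: Replaces the early-return scan carrying a prev variable with a set/sort formulation: arr is valid iff it equals the sorted list of its distinct elements (strict increase) and the set of residues mod 2 is a subset of {1} (all odd).
import Mathlib
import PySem

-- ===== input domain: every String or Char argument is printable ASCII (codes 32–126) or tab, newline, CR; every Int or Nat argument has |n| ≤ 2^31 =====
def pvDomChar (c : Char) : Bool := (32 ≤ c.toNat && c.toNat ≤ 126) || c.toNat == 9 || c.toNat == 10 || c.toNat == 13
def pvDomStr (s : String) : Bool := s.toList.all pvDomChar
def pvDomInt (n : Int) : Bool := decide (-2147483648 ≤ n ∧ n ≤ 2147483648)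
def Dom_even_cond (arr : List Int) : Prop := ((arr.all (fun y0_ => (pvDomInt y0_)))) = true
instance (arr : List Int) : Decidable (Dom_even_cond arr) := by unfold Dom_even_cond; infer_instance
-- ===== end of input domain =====

-- B replaces A's early-return prev-tracking scan by a set/sort formulation (arr == sorted(set(arr)) and residue-set ⊆ {1}); alternative algorithm, not faster.


-- ===== PORT A =====
-- the for-loop over range(1, len arr) with early returns, carrying prev
def even_cond_loop (prev : Int) (rest : List Int) : Bool :=
  match rest with
  | [] => true
  | x :: xs =>
    if PySem.Int.mod x 2 ≠ 1 then false
    else if x ≤ prev then false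
    else even_cond_loop x xs

def even_cond (arr : List Int) : Bool :=
  match arr with
  | [] => true
  | prev :: rest =>
    if PySem.Int.mod prev 2 ≠ 1 then false
    else even_cond_loop prev rest

-- ===== PORT B =====
-- arr == sorted(set(arr))  and  set(x % 2 for x in arr) <= {1}
def even_cond_alt (arr : List Int) : Bool :=
  decide (arr = PySem.List.sorted (PySem.Set.ofList arr) (fun x => x) false)
  && PySem.Set.issubset (PySem.Set.ofList (arr.map (fun x => PySem.Int.mod x 2))) (PySem.Set.ofList [1])

-- ===== PRECONDITION & SPEC =====
def Spec_even_cond (arr : List Int) (out : Bool) : Prop := out = even_cond_alt arr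
instance (arr : List Int) (out : Bool) : Decidable (Spec_even_cond arr out) := by unfold Spec_even_cond; infer_instance

-- ===== CLAIM (what is proved, stated in full; the proofs are below) =====
def Claim_equal_even_cond : Prop := ∀ (arr : List Int), Dom_even_cond arr → Spec_even_cond arr (even_cond arr)

-- ===== LEMMAS AND PROOFS =====
theorem even_cond_loop_iff (rest : List Int) (prev : Int) :
    even_cond_loop prev rest = true ↔
      ((∀ x ∈ rest, prev < x) ∧ rest.Pairwise (· < ·) ∧
        ∀ x ∈ rest, PySem.Int.mod x 2 = 1) := by
  induction rest generalizing prev with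
  | nil => simp [even_cond_loop]
  | cons x xs ih =>
    simp only [even_cond_loop]
    split_ifs with h1 h2
    · simp only [false_iff]
      rintro ⟨-, -, hodd⟩
      exact h1 (hodd x (List.mem_cons_self))
    · simp only [false_iff]
      rintro ⟨hlt, -, -⟩
      exact absurd (hlt x (List.mem_cons_self)) (not_lt.mpr h2)
    · have h1' : PySem.Int.mod x 2 = 1 := not_ne_iff.mp h1
      have h2' : prev < x := lt_of_not_ge h2
      rw [ih x]
      constructor
      · rintro ⟨hall, hpw, hodd⟩
        refine ⟨fun y hy => ?_, List.pairwise_cons.mpr ⟨hall, hpw⟩, fun y hy => ?_⟩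
        · rcases List.mem_cons.mp hy with rfl | hy
          · exact h2'
          · exact lt_trans h2' (hall y hy)
        · rcases List.mem_cons.mp hy with rfl | hy
          · exact h1'
          · exact hodd y hy
      · rintro ⟨-, hpw, hodd⟩
        obtain ⟨hall, hpw'⟩ := List.pairwise_cons.mp hpw
        exact ⟨hall, hpw', fun y hy => hodd y (List.mem_cons_of_mem x hy)⟩

theorem even_cond_iff (arr : List Int) :
    even_cond arr = true ↔
      (arr.Pairwise (· < ·) ∧ ∀ x ∈ arr, PySem.Int.mod x 2 = 1) := by
  match arr with
  | [] => simp [even_cond]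
  | prev :: rest =>
    simp only [even_cond]
    split_ifs with h1
    · simp only [false_iff]
      rintro ⟨-, hodd⟩
      exact h1 (hodd prev (List.mem_cons_self))
    · have h1' : PySem.Int.mod prev 2 = 1 := not_ne_iff.mp h1
      rw [even_cond_loop_iff, List.pairwise_cons]
      constructor
      · rintro ⟨hall, hpw, hodd⟩
        refine ⟨⟨hall, hpw⟩, fun y hy => ?_⟩
        rcases List.mem_cons.mp hy with rfl | hy
        · exact h1'
        · exact hodd y hy
      · rintro ⟨⟨hall, hpw⟩, hodd⟩
        exact ⟨hall, hpw, fun y hy => hodd y (List.mem_cons_of_mem prev hy)⟩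

theorem even_cond_alt_iff (arr : List Int) :
    even_cond_alt arr = true ↔
      (arr.Pairwise (· < ·) ∧ ∀ x ∈ arr, PySem.Int.mod x 2 = 1) := by
  simp only [even_cond_alt, Bool.and_eq_true, decide_eq_true_eq,
    PySem.Set.issubset_iff]
  constructor
  · rintro ⟨heq, hsub⟩
    refine ⟨heq ▸ PySem.List.sorted_ofList_pairwise_lt arr, fun x hx => ?_⟩
    have hm : PySem.Int.mod x 2 ∈ PySem.Set.ofList (arr.map (fun x => PySem.Int.mod x 2)) :=
      (PySem.Set.mem_ofList _ _).mpr (List.mem_map_of_mem hx)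
    have := hsub _ hm
    rw [PySem.Set.mem_ofList] at this
    simpa using this
  · rintro ⟨hpw, hodd⟩
    have hnd : arr.Nodup := hpw.nodup
    refine ⟨?_, fun r hr => ?_⟩
    · rw [PySem.Set.ofList_eq_self_of_nodup arr hnd]
      exact (PySem.List.sorted_eq_self_of_pairwise arr (fun x => x) (hpw.imp le_of_lt)).symm
    · rw [PySem.Set.mem_ofList] at hr ⊢
      obtain ⟨x, hx, rfl⟩ := List.mem_map.mp hr
      simpa using hodd x hx

-- ===== VERDICT (by name: the statement is the Claim_ definition above) =====
theorem even_cond_spec : Claim_equal_even_cond := by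
  intro arr _
  unfold Spec_even_cond
  cases h1 : even_cond arr <;> cases h2 : even_cond_alt arr <;> try rfl
  · exact absurd ((even_cond_iff arr).mpr ((even_cond_alt_iff arr).mp h2)) (by simp [h1])
  · exact absurd ((even_cond_alt_iff arr).mpr ((even_cond_iff arr).mp h1)) (by simp [h2])
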